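-- pv_equiv track=rewrite | github.com/pego/twin-mind | scripts/twin_mind/entity_graph.py | _neutralize_js_content
-- ===== SOURCE A (Python) =====
-- def _neutralize_js_content(content: str) -> str:
--     """Replace JS/TS strings and comments with spaces while preserving offsets/newlines."""
--     chars = list(content)
--     out = chars[:]
--     i = 0
--     n = len(chars)
--     state = "code"
--     quote = ""
--
--     while i < n:
--         c = chars[i]
--         nxt = chars[i + 1] if i + 1 < n else ""
--
--         if state == "code":
--             if c == "/" and nxt == "/":
--                 out[i] = " "
--                 out[i + 1] = " "
--                 i += 2
--                 state = "line_comment"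
--                 continue
--             if c == "/" and nxt == "*":
--                 out[i] = " "
--                 out[i + 1] = " "
--                 i += 2
--                 state = "block_comment"
--                 continue
--             if c in ("'", '"', "`"):
--                 quote = c
--                 out[i] = " "
--                 i += 1
--                 state = "string"
--                 continue
--             i += 1
--             continue
--
--         if state == "line_comment":
--             if c == "\n":
--                 i += 1
--                 state = "code"
--                 continue
--             out[i] = " "
--             i += 1
--             continue
--
--         if state == "block_comment":
--             if c == "*" and nxt == "/":
--                 out[i] = " "
--                 out[i + 1] = " "
--                 i += 2
--                 state = "code"
--                 continue
--             if c != "\n":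
--                 out[i] = " "
--             i += 1
--             continue
--
--         if state == "string":
--             if c == "\\" and i + 1 < n:
--                 if out[i] != "\n":
--                     out[i] = " "
--                 if out[i + 1] != "\n":
--                     out[i + 1] = " "
--                 i += 2
--                 continue
--             if c == quote:
--                 out[i] = " "
--                 i += 1
--                 state = "code"
--                 continue
--             if c != "\n":
--                 out[i] = " "
--             i += 1
--             continue
--
--     return "".join(out)
-- ===== SOURCE B (Python) =====
-- def _blank(s):
--     return "".join("\n" if ch == "\n" else " " for ch in s)
--
--
-- def _neutralize_js_content(content: str) -> str:
--     """Span-based scanner: find each string/comment token, blank its whole span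
--     (keeping newlines) with slicing, and copy code runs through unchanged."""
--     n = len(content)
--     pieces = []
--     pos = 0  # start of the current untouched code run
--     i = 0
--     while i < n:
--         c = content[i]
--         if c == "/" and i + 1 < n and content[i + 1] in "/*":
--             pieces.append(content[pos:i])
--             if content[i + 1] == "/":
--                 e = content.find("\n", i + 2)
--                 end = n if e == -1 else e
--             else:
--                 e = content.find("*/", i + 2)
--                 end = n if e == -1 else e + 2
--             pieces.append(_blank(content[i:end]))
--             pos = i = end
--         elif c in "'\"`":
--             pieces.append(content[pos:i])
--             k = i + 1
--             while k < n:
--                 if content[k] == "\\" and k + 1 < n: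
--                     k += 2
--                 elif content[k] == c:
--                     k += 1
--                     break
--                 else:
--                     k += 1
--             pieces.append(_blank(content[i:k]))
--             pos = i = k
--         else:
--             i += 1
--     pieces.append(content[pos:])
--     return "".join(pieces)
-- ===== Notes on version B (the rewrite author's own statement) =====
-- stated objective: alternative
-- what changed: Replaced the per-character four-state machine writing into a copied char array with a span-based scanner that finds each string/comment token, computes its whole extent via str.find / an escape-aware scan, blanks the span with slicing and a blank() helper, and copies code runs through unchanged.
import Mathlib
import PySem

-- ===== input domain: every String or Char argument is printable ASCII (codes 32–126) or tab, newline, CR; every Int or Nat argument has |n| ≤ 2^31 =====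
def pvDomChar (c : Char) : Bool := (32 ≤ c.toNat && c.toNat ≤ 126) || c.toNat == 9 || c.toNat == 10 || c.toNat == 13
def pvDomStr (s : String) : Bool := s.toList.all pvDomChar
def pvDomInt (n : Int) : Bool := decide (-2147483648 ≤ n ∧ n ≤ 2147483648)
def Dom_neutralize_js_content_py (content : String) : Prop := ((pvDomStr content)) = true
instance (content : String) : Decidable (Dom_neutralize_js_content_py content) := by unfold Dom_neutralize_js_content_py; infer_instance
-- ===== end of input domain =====

-- B replaces A's per-character state machine with a span-based scanner that blanks
-- whole string/comment token spans found by search (objective: alternative).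

-- ===== PORT A =====
-- A's while loop writes into `out` only at positions the index has not yet passed,
-- strictly left to right, so it is transliterated as a recursion over the remaining
-- character list carrying A's `state`; each branch is A's branch in A's order.
inductive PvSt
  | code
  | line
  | block
  | str (q : Char)

def pvGoA : List Char → PvSt → List Char
  | [], _ => []
  | c :: rest, PvSt.code =>
    if c = '/' ∧ rest.head? = some '/' then ' ' :: ' ' :: pvGoA rest.tail PvSt.line
    else if c = '/' ∧ rest.head? = some '*' then ' ' :: ' ' :: pvGoA rest.tail PvSt.block
    else if c = '\'' ∨ c = '"' ∨ c = '`' then ' ' :: pvGoA rest (PvSt.str c)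
    else c :: pvGoA rest PvSt.code
  | c :: rest, PvSt.line =>
    if c = '\n' then '\n' :: pvGoA rest PvSt.code
    else ' ' :: pvGoA rest PvSt.line
  | c :: rest, PvSt.block =>
    if c = '*' ∧ rest.head? = some '/' then ' ' :: ' ' :: pvGoA rest.tail PvSt.code
    else (if c = '\n' then c else ' ') :: pvGoA rest PvSt.block
  | c :: rest, PvSt.str q =>
    if c = '\\' ∧ rest ≠ [] then
      (if c = '\n' then c else ' ') :: (if rest.headD ' ' = '\n' then '\n' else ' ')
        :: pvGoA rest.tail (PvSt.str q)
    else if c = q then ' ' :: pvGoA rest PvSt.code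
    else (if c = '\n' then c else ' ') :: pvGoA rest (PvSt.str q)
termination_by l _ => l.length
decreasing_by all_goals (simp only [List.length_cons, List.length_tail]; omega)

def neutralize_js_content_py (content : String) : String :=
  String.mk (pvGoA content.toList PvSt.code)

-- ===== PORT B =====
-- pvBlankc is Source B's _blank, per character.
def pvBlankc (c : Char) : Char := if c = '\n' then '\n' else ' '

-- Source B's `content.find("*/", …)` + slice: left-to-right scan returning
-- (blanked-span source, remainder); exact for str.find's first-occurrence rule.
def pvSplitBlock : List Char → List Char × List Char
  | [] => ([], [])
  | c :: rest =>
    if c = '*' ∧ rest.head? = some '/' then (['*', '/'], rest.tail)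
    else
      let p := pvSplitBlock rest
      (c :: p.1, p.2)

-- Source B's inner `while k < n` string scan: returns (string span after the opening
-- quote, remainder), same branch order (escape, closing quote, other).
def pvSplitStr (q : Char) : List Char → List Char × List Char
  | [] => ([], [])
  | c :: rest =>
    if c = '\\' ∧ rest ≠ [] then
      let p := pvSplitStr q rest.tail
      (c :: rest.headD ' ' :: p.1, p.2)
    else if c = q then ([c], rest)
    else
      let p := pvSplitStr q rest
      (c :: p.1, p.2)
termination_by l => l.length
decreasing_by all_goals (simp only [List.length_cons, List.length_tail]; omega)

theorem pvSplitBlock_snd_le (l : List Char) : (pvSplitBlock l).2.length ≤ l.length := by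
  induction l with
  | nil => simp [pvSplitBlock]
  | cons c rest ih =>
    simp only [pvSplitBlock]
    split
    · simp only [List.length_tail, List.length_cons]; omega
    · simpa using Nat.le_succ_of_le ih

theorem pvSplitStr_snd_le (q : Char) : ∀ (n : ℕ) (l : List Char), l.length ≤ n →
    (pvSplitStr q l).2.length ≤ l.length := by
  intro n
  induction n with
  | zero =>
    intro l hl
    have : l = [] := List.eq_nil_of_length_eq_zero (Nat.le_zero.mp hl)
    simp [this, pvSplitStr]
  | succ n ih =>
    intro l hl
    match l with
    | [] => simp [pvSplitStr]
    | c :: rest =>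
      by_cases h : c = '\\' ∧ rest ≠ []
      · have htl : rest.tail.length ≤ n := by
          have := List.length_tail (l := rest)
          simp at hl
          omega
        have h2 := ih rest.tail htl
        have h3 := List.length_tail (l := rest)
        simp only [pvSplitStr, if_pos h, List.length_cons]
        omega
      · by_cases h2 : c = q
        · subst h2
          simp [pvSplitStr, h]
        · have hr : rest.length ≤ n := by simp at hl; omega
          have h4 := ih rest hr
          simp only [pvSplitStr, if_neg h, if_neg h2, List.length_cons]
          omega

-- Source B's outer loop: copy code characters through; at a token start, emit the
-- blanked span and resume after it (find("\n",…) ported as takeWhile/dropWhile).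
def pvGoB : List Char → List Char
  | [] => []
  | c :: rest =>
    if c = '/' ∧ rest.head? = some '/' then
      let pre := rest.tail.takeWhile (· ≠ '\n')
      ('/' :: '/' :: pre).map pvBlankc ++ pvGoB (rest.tail.dropWhile (· ≠ '\n'))
    else if c = '/' ∧ rest.head? = some '*' then
      let p := pvSplitBlock rest.tail
      ('/' :: '*' :: p.1).map pvBlankc ++ pvGoB p.2
    else if c = '\'' ∨ c = '"' ∨ c = '`' then
      let p := pvSplitStr c rest
      (c :: p.1).map pvBlankc ++ pvGoB p.2
    else c :: pvGoB rest
termination_by l => l.length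
decreasing_by
  · have h1 : (List.dropWhile (fun x => decide (x ≠ '\n')) rest.tail).length ≤ rest.tail.length :=
      (List.dropWhile_sublist _).length_le
    have h2 := List.length_tail (l := rest)
    simp only [List.length_cons]
    omega
  · have h1 := pvSplitBlock_snd_le rest.tail
    have h2 := List.length_tail (l := rest)
    simp only [List.length_cons]
    omega
  · have h1 := pvSplitStr_snd_le c rest.length rest le_rfl
    simp only [List.length_cons]
    omega
  · simp only [List.length_cons]; omega

def neutralize_js_content_py_alt (content : String) : String :=
  String.mk (pvGoB content.toList)

-- ===== PRECONDITION & SPEC =====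
def Spec_neutralize_js_content_py (content : String) (out : String) : Prop := out = neutralize_js_content_py_alt content
instance (content : String) (out : String) : Decidable (Spec_neutralize_js_content_py content out) := by unfold Spec_neutralize_js_content_py; infer_instance

-- ===== CLAIM (what is proved, stated in full; the proofs are below) =====
def Claim_equal_neutralize_js_content_py : Prop := ∀ (content : String), Dom_neutralize_js_content_py content → Spec_neutralize_js_content_py content (neutralize_js_content_py content)

-- ===== LEMMAS AND PROOFS =====

theorem pvA_line (l : List Char) :
    pvGoA l PvSt.line =
      (l.takeWhile (· ≠ '\n')).map pvBlankc ++ pvGoA (l.dropWhile (· ≠ '\n')) PvSt.code := by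
  induction l with
  | nil => simp [pvGoA]
  | cons c rest ih =>
    by_cases h : c = '\n'
    · subst h
      simp [pvGoA]
    · simp [pvGoA, h, pvBlankc, ih]

theorem pvA_block (l : List Char) :
    pvGoA l PvSt.block =
      (pvSplitBlock l).1.map pvBlankc ++ pvGoA (pvSplitBlock l).2 PvSt.code := by
  induction l with
  | nil => simp [pvGoA, pvSplitBlock]
  | cons c rest ih =>
    by_cases h : c = '*' ∧ rest.head? = some '/'
    · simp [pvGoA, pvSplitBlock, h, pvBlankc]
    · simp only [pvGoA, pvSplitBlock, if_neg h, List.map_cons, List.cons_append, ih]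
      by_cases hc : c = '\n' <;> simp [pvBlankc, hc]

theorem pvA_str (q : Char) (hq : q ≠ '\n') :
    ∀ (n : ℕ) (l : List Char), l.length ≤ n →
      pvGoA l (PvSt.str q) =
        (pvSplitStr q l).1.map pvBlankc ++ pvGoA (pvSplitStr q l).2 PvSt.code := by
  intro n
  induction n with
  | zero =>
    intro l hl
    have : l = [] := List.eq_nil_of_length_eq_zero (Nat.le_zero.mp hl)
    simp [this, pvGoA, pvSplitStr]
  | succ n ih =>
    intro l hl
    match l with
    | [] => simp [pvGoA, pvSplitStr]
    | c :: rest =>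
      by_cases h : c = '\\' ∧ rest ≠ []
      · have htl : rest.tail.length ≤ n := by
          have := List.length_tail (l := rest)
          simp at hl
          omega
        simp only [pvGoA, pvSplitStr, if_pos h]
        rw [ih rest.tail htl]
        obtain ⟨hc, -⟩ := h
        subst hc
        simp [pvBlankc]
      · by_cases h2 : c = q
        · subst h2
          simp [pvGoA, pvSplitStr, h, pvBlankc, hq]
        · have hr : rest.length ≤ n := by simp at hl; omega
          simp only [pvGoA, pvSplitStr, if_neg h, if_neg h2, List.map_cons, List.cons_append]
          rw [ih rest hr]
          by_cases hc : c = '\n' <;> simp [pvBlankc, hc]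

theorem pvAB (n : ℕ) : ∀ (l : List Char), l.length ≤ n → pvGoA l PvSt.code = pvGoB l := by
  induction n with
  | zero =>
    intro l hl
    have : l = [] := List.eq_nil_of_length_eq_zero (Nat.le_zero.mp hl)
    simp [this, pvGoA, pvGoB]
  | succ n ih =>
    intro l hl
    match l with
    | [] => simp [pvGoA, pvGoB]
    | c :: rest =>
      have hrest : rest.length ≤ n := by simp at hl; omega
      by_cases h1 : c = '/' ∧ rest.head? = some '/'
      · have hd : (rest.tail.dropWhile (· ≠ '\n')).length ≤ n := by
          have h1' := List.length_dropWhile_le (p := fun x => decide (x ≠ '\n')) (l := rest.tail)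
          have h2' := List.length_tail (l := rest)
          simp at h1' h2' ⊢
          omega
        simp only [pvGoA, pvGoB, if_pos h1]
        rw [pvA_line, ih _ hd]
        simp [pvBlankc]
      · by_cases h2 : c = '/' ∧ rest.head? = some '*'
        · have hd : (pvSplitBlock rest.tail).2.length ≤ n := by
            have h1' := pvSplitBlock_snd_le rest.tail
            have h2' := List.length_tail (l := rest)
            omega
          simp only [pvGoA, pvGoB, if_neg h1, if_pos h2]
          rw [pvA_block, ih _ hd]
          simp [pvBlankc]
        · by_cases h3 : c = '\'' ∨ c = '"' ∨ c = '`'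
          · have hd : (pvSplitStr c rest).2.length ≤ n := by
              have := pvSplitStr_snd_le c rest.length rest le_rfl
              omega
            have hcn : c ≠ '\n' := by rcases h3 with h | h | h <;> subst h <;> decide
            simp only [pvGoA, pvGoB, if_neg h1, if_neg h2, if_pos h3]
            rw [pvA_str c hcn rest.length rest le_rfl, ih _ hd]
            simp [pvBlankc, hcn]
          · simp [pvGoA, pvGoB, h1, h2, h3, ih rest hrest]

-- ===== VERDICT (by name: the statement is the Claim_ definition above) =====
theorem neutralize_js_content_py_spec : Claim_equal_neutralize_js_content_py := by
  intro content _
  show _ = _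
  unfold neutralize_js_content_py neutralize_js_content_py_alt
  exact congrArg String.mk (pvAB content.toList.length content.toList le_rfl)
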